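-- pv_equiv track=rewrite | github.com/parvatalaprasanth/Practice-Python | REmove_end_arry.py | solve
-- ===== SOURCE A (Python) =====
-- def solve( a, low, high, turn):
--
-- 	# If only one element left.
-- 	if (low == high):
-- 		return a[low] * turn
--
-- 	# If already calculated,
-- 	# return the value.
--
--
-- 	# Computing Maximum value when element
-- 	# at index i and index j is to be chosed.
-- 	return max(a[low] * turn + solve( a,
-- 						low + 1, high, turn + 1),
-- 						a[high] * turn + solve( a,
-- 						low, high - 1, turn + 1));
--
-- 	return dp[low][high]
-- ===== SOURCE B (Python) =====
-- def solve(a, low, high, turn):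
--     # Bottom-up interval DP over gap length (turn is determined by the gap),
--     # replacing A's exponential branching recursion.
--     n = high - low + 1
--     cur = [a[low + i] * (turn + n - 1) for i in range(n)]
--     for g in range(1, n):
--         t = turn + n - 1 - g
--         cur = [max(a[low + i] * t + cur[i + 1],
--                    a[low + i + g] * t + cur[i])
--                for i in range(n - g)]
--     return cur[0]
-- ===== Notes on version B (the rewrite author's own statement) =====
-- stated objective: faster
-- what changed: Replaced A's exponential two-branch recursion over (low,high) by a bottom-up interval dynamic program over gap length (the turn weight is determined by the gap), keeping one row of values per gap.
import Mathlib
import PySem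

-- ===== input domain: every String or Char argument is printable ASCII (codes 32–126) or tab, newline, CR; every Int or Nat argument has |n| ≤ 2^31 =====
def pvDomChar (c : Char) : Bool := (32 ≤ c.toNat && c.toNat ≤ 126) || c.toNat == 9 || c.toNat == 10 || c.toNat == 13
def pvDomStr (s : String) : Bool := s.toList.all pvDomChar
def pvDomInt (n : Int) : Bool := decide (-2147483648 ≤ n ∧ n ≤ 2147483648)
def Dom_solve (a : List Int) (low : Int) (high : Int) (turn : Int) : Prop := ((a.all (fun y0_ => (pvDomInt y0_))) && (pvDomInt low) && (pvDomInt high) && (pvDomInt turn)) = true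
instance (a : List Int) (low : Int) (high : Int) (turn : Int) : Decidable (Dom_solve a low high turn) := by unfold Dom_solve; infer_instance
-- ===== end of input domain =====

-- B replaces A's exponential two-branch recursion by a bottom-up interval DP over
-- gap length (the turn weight is determined by the gap); objective: faster.


-- ===== PORT A =====
-- literal transliteration of A; the final `else 0` guards the case low > high,
-- on which the Python recursion never terminates (excluded by Pre_solve)
def solve (a : List Int) (low : Int) (high : Int) (turn : Int) : Int :=
  if low = high then PySem.List.pyGetD a low 0 * turn
  else if low < high then
    max (PySem.List.pyGetD a low 0 * turn + solve a (low + 1) high (turn + 1))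
        (PySem.List.pyGetD a high 0 * turn + solve a low (high - 1) (turn + 1))
  else 0
termination_by (high - low).toNat
decreasing_by all_goals omega

-- ===== PORT B =====
-- loop body of B: one gap level g of the DP
def solveAltStep (a : List Int) (low : Int) (n : Int) (turn : Int)
    (cur : List Int) (g : Int) : List Int :=
  let t := turn + n - 1 - g
  (PySem.List.pyRange 0 (n - g) 1).map (fun i =>
    max (PySem.List.pyGetD a (low + i) 0 * t + PySem.List.pyGetD cur (i + 1) 0)
        (PySem.List.pyGetD a (low + i + g) 0 * t + PySem.List.pyGetD cur i 0))

def solve_alt (a : List Int) (low : Int) (high : Int) (turn : Int) : Int :=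
  let n := high - low + 1
  let cur0 := (PySem.List.pyRange 0 n 1).map (fun i =>
    PySem.List.pyGetD a (low + i) 0 * (turn + n - 1))
  let cur := (PySem.List.pyRange 1 n 1).foldl (solveAltStep a low n turn) cur0
  PySem.List.pyGetD cur 0 0

-- ===== PRECONDITION & SPEC =====
-- Pre_: exactly where Python A returns — low ≤ high (otherwise the recursion never
-- terminates) and every index of [low, high] is valid under Python's negative indexing
-- (otherwise a[low]/a[high] raises IndexError).
def Pre_solve (a : List Int) (low : Int) (high : Int) (turn : Int) : Prop :=
  low ≤ high ∧ -(a.length : Int) ≤ low ∧ high < (a.length : Int)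
instance (a : List Int) (low : Int) (high : Int) (turn : Int) : Decidable (Pre_solve a low high turn) := by unfold Pre_solve; infer_instance

def pvWitness_solve : List Int × Int × Int × Int := ([3, -1, 4, 2], 0, 3, 1)

def Spec_solve (a : List Int) (low : Int) (high : Int) (turn : Int) (out : Int) : Prop := out = solve_alt a low high turn
instance (a : List Int) (low : Int) (high : Int) (turn : Int) (out : Int) : Decidable (Spec_solve a low high turn out) := by unfold Spec_solve; infer_instance

-- ===== CLAIM (what is proved, stated in full; the proofs are below) =====
def Claim_equal_solve : Prop := ∀ (a : List Int) (low : Int) (high : Int) (turn : Int), Dom_solve a low high turn → Pre_solve a low high turn → Spec_solve a low high turn (solve a low high turn)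

-- ===== LEMMAS AND PROOFS =====

-- row of DP values at gap d, as a function of the start offset
def dpF (a : List Int) (low : Int) (turn : Int) (n : Int) (d : Int) (i : Int) : Int :=
  solve a (low + i) (low + i + d) (turn + (n - 1 - d))

lemma solve_rec (a : List Int) (low high turn : Int) (h : low < high) :
    solve a low high turn
    = max (PySem.List.pyGetD a low 0 * turn + solve a (low + 1) high (turn + 1))
          (PySem.List.pyGetD a high 0 * turn + solve a low (high - 1) (turn + 1)) := by
  rw [solve]
  rw [if_neg (by omega), if_pos h]

lemma step_row (a : List Int) (low turn n g : Int) (hg : 1 ≤ g) (hgn : g < n) :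
    solveAltStep a low n turn
      ((PySem.List.pyRange 0 (n - g + 1) 1).map (dpF a low turn n (g - 1)))
      g
    = (PySem.List.pyRange 0 (n - g) 1).map (dpF a low turn n g) := by
  unfold solveAltStep
  apply List.map_congr_left
  intro i hi
  rw [PySem.List.mem_pyRange_one] at hi
  rw [PySem.List.pyGetD_map_pyRange_of_nonneg (dpF a low turn n (g - 1)) (n - g + 1) (i + 1) 0
        (by omega) (by omega)]
  rw [PySem.List.pyGetD_map_pyRange_of_nonneg (dpF a low turn n (g - 1)) (n - g + 1) i 0
        (by omega) (by omega)]
  unfold dpF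
  rw [solve_rec a (low + i) (low + i + g) (turn + (n - 1 - g)) (by omega)]
  rw [show low + (i + 1) = low + i + 1 from by ring,
      show low + i + 1 + (g - 1) = low + i + g from by ring,
      show turn + (n - 1 - (g - 1)) = turn + (n - 1 - g) + 1 from by ring,
      show low + i + (g - 1) = low + i + g - 1 from by ring,
      show turn + n - 1 - g = turn + (n - 1 - g) from by ring]

lemma loop_inv (a : List Int) (low turn n : Int) :
    ∀ (m : Nat) (g : Int), n - g = (m : Int) → 1 ≤ g → g ≤ n →
      (PySem.List.pyRange g n 1).foldl (solveAltStep a low n turn)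
        ((PySem.List.pyRange 0 (n - g + 1) 1).map (dpF a low turn n (g - 1)))
      = (PySem.List.pyRange 0 1 1).map (dpF a low turn n (n - 1)) := by
  intro m
  induction m with
  | zero =>
    intro g hm hg1 hgn
    have hgn' : g = n := by omega
    subst hgn'
    rw [PySem.List.pyRange_one_eq_nil (le_refl _)]
    simp [List.foldl]
  | succ k ih =>
    intro g hm hg1 hgn
    have hlt : g < n := by omega
    rw [PySem.List.pyRange_one_cons hlt]
    simp only [List.foldl_cons]
    rw [step_row a low turn n g hg1 hlt]
    have : (PySem.List.pyRange 0 (n - g) 1) = (PySem.List.pyRange 0 (n - (g + 1) + 1) 1) := by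
      congr 1; omega
    rw [this]
    have hd : dpF a low turn n g = dpF a low turn n ((g + 1) - 1) := by
      congr 1; omega
    rw [hd]
    exact ih (g + 1) (by omega) (by omega) (by omega)

lemma base_row (a : List Int) (low turn n : Int) :
    (PySem.List.pyRange 0 n 1).map (fun i => PySem.List.pyGetD a (low + i) 0 * (turn + n - 1))
    = (PySem.List.pyRange 0 n 1).map (dpF a low turn n 0) := by
  apply List.map_congr_left
  intro i hi
  unfold dpF
  rw [solve]
  rw [if_pos (by omega)]
  ring_nf

-- ===== VERDICT (by name: the statement is the Claim_ definition above) =====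
theorem solve_spec : Claim_equal_solve := by
  intro a low high turn _hdom hpre
  obtain ⟨hle, _, _⟩ := hpre
  unfold Spec_solve solve_alt
  simp only []
  set n := high - low + 1 with hn
  have hn1 : 1 ≤ n := by omega
  rw [base_row a low turn n]
  have h01 : (PySem.List.pyRange 0 n 1) = (PySem.List.pyRange 0 (n - 1 + 1) 1) := by
    congr 1; omega
  have hd0 : dpF a low turn n 0 = dpF a low turn n (1 - 1) := by norm_num
  rw [h01, hd0, loop_inv a low turn n (n - 1).toNat 1 (by omega) (by omega) hn1]
  rw [show PySem.List.pyRange (0:Int) 1 1 = [(0:Int)] from by decide]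
  simp only [List.map_cons, List.map_nil]
  rw [PySem.List.pyGetD_zero_cons]
  unfold dpF
  congr 1 <;> omega
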